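-- pv_equiv track=rewrite | github.com/Chenguang-Zhu/DocCon | smart_factbase/match.py | fuzzyMatchExpr
-- ===== SOURCE A (Python) =====
-- def fuzzyMatchExpr(doc_expr, code_expr):
--     if doc_expr == code_expr:
--         return True
--     if doc_expr.lower() == code_expr.lower():
--         return True
--     if doc_expr.endswith('_balance'):
--         if doc_expr.split('_')[0] + doc_expr.split('_')[-1].title() == code_expr:  # code in camel case
--             # xxx_balance -> xxxBalance
--             return True
--     if doc_expr == 'the caller':  # ERC1155
--         if code_expr == 'owner':
--             return True
--     if '(' in doc_expr and ')' in doc_expr: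
--         # function call, check function name
--         return fuzzyMatchExpr(doc_expr.split('(')[0], code_expr.split('(')[0])
--     return False
-- ===== SOURCE B (Python) =====
-- def fuzzyMatchExpr(doc_expr, code_expr):
--     # Build the (at most two) candidate pairs up front, then scan them with
--     # three merged checks: exact equality is subsumed by the case-insensitive
--     # one, and the '_balance' camel suffix is always the literal 'Balance'.
--     pairs = [(doc_expr, code_expr)]
--     if '(' in doc_expr and ')' in doc_expr:
--         pairs.append((doc_expr.split('(')[0], code_expr.split('(')[0]))
--     for d, c in pairs:
--         if d.lower() == c.lower():
--             return True
--         if d.endswith('_balance') and c == d.partition('_')[0] + 'Balance':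
--             return True
--         if (d, c) == ('the caller', 'owner'):
--             return True
--     return False
-- ===== Notes on version B (the rewrite author's own statement) =====
-- stated objective: simpler
-- what changed: A's tail recursion over four sequential checks is replaced by building the (at most two) candidate string pairs up front and scanning them with three merged checks: exact equality is folded into the case-insensitive comparison, and the '_balance' camel-case target is built with partition and the constant 'Balance' instead of split/title.
import Mathlib
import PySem

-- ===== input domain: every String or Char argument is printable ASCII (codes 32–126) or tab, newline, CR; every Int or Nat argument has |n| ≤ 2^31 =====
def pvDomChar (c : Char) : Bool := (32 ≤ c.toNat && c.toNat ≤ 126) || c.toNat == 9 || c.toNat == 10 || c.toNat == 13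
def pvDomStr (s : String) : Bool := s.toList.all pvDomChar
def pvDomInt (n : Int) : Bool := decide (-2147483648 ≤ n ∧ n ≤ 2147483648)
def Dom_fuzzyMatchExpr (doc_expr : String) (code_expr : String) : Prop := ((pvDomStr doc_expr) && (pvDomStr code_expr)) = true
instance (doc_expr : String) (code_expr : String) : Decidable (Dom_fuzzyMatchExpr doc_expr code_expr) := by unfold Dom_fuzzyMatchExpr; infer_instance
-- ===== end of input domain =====

-- B replaces A's four-check tail recursion by an up-front list of (at most two) candidate
-- pairs scanned with three merged checks (equality folded into the case-insensitive check,
-- the '_balance' camel suffix computed as the literal 'Balance'); objective: simpler.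

-- ===== PORT A =====
-- hand port of str.title(): exact on ASCII (a char is "cased" iff it is a letter;
-- a letter after a cased char is lowered, otherwise uppercased; other chars pass through)
def pyTitleGo : List Char → Bool → List Char
  | [], _ => []
  | c :: rest, prev =>
    if PySem.Chars.isalpha c then
      (if prev then PySem.Chars.lowerChar c else PySem.Chars.upperChar c) :: pyTitleGo rest true
    else
      c :: pyTitleGo rest false

def pyTitle (s : List Char) : List Char := pyTitleGo s false

-- the next four lemmas are needed by port A's termination proof, so they live above it:
-- splitOn.go's accumulator only prepends finished pieces …
theorem pvGoAcc (sep : Char) : ∀ (fuel : Nat) (l cur : List Char) (acc : List (List Char)),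
    PySem.Chars.splitOn.go [sep] fuel l cur acc = acc.reverse ++ PySem.Chars.splitOn.go [sep] fuel l cur [] := by
  intro fuel
  induction fuel with
  | zero => intro l cur acc; simp [PySem.Chars.splitOn.go]
  | succ n ih =>
    intro l cur acc
    cases l with
    | nil => simp [PySem.Chars.splitOn.go]
    | cons c rest =>
      rw [PySem.Chars.splitOn.go, PySem.Chars.splitOn.go]
      by_cases h : List.isPrefixOf [sep] (c :: rest) = true
      · rw [if_pos h, if_pos h, ih _ _ (cur.reverse :: acc), ih _ _ [cur.reverse]]
        simp
      · rw [if_neg h, if_neg h]; exact ih _ _ acc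

theorem pvHeadGo (sep : Char) : ∀ (fuel : Nat) (l cur : List Char), l.length ≤ fuel →
    (PySem.Chars.splitOn.go [sep] fuel l cur []).headD [] = cur.reverse ++ l.takeWhile (· != sep) := by
  intro fuel
  induction fuel with
  | zero =>
    intro l cur hl
    have : l = [] := List.eq_nil_of_length_eq_zero (Nat.le_zero.mp hl)
    subst this; simp [PySem.Chars.splitOn.go]
  | succ n ih =>
    intro l cur hl
    cases l with
    | nil => simp [PySem.Chars.splitOn.go]
    | cons c rest =>
      rw [PySem.Chars.splitOn.go]
      by_cases h : List.isPrefixOf [sep] (c :: rest) = true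
      · have hac : sep = c := by simp [List.isPrefixOf] at h; exact h
        rw [if_pos h, pvGoAcc]
        subst hac
        simp
      · have hac : ¬ sep = c := by
          intro hh; subst hh; simp [List.isPrefixOf] at h
        rw [if_neg h, ih rest (c :: cur) (by simpa using Nat.lt_succ_iff.mp (by simpa using hl))]
        have : (c != sep) = true := by simp [bne]; exact fun hh => hac hh.symm
        simp [List.takeWhile, this]

-- … so s.split(sep)[0] is the prefix of s before the first sep
theorem pvSplitOnHead (sep : Char) (s : List Char) :
    (PySem.Chars.splitOn s [sep]).headD [] = s.takeWhile (· != sep) := by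
  rw [PySem.Chars.splitOn, pvHeadGo _ _ s [] (by omega)]
  simp

-- … which is strictly shorter than s when '(' ∈ s (the recursion's measure drops)
theorem pvSplitHeadLt {d : List Char} (h : PySem.Chars.isIn ['('] d = true) :
    ((PySem.Chars.splitOn d ['(']).headD []).length < d.length := by
  have hmem : '(' ∈ d := ((PySem.Chars.isIn_iff_infix ['('] d).mp h).mem (by simp)
  clear h
  rw [pvSplitOnHead]
  induction d with
  | nil => simp at hmem
  | cons c rest ih =>
    by_cases hc : c = '('
    · subst hc; simp [List.takeWhile]
    · have hcb : (c != '(') = true := by simp [bne, hc]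
      simp only [List.takeWhile, hcb]
      have hm : '(' ∈ rest := by
        cases hmem with
        | head => exact absurd rfl hc
        | tail _ hh => exact hh
      simpa using ih hm

def fuzzyACore (d c : List Char) : Bool :=
  if d == c then true
  else if PySem.Chars.lower d == PySem.Chars.lower c then true
  else if PySem.Chars.endswith d "_balance".toList &&
          ((PySem.Chars.splitOn d ['_']).headD [] ++
             pyTitle ((PySem.Chars.splitOn d ['_']).getLastD []) == c) then true
  else if d == "the caller".toList && c == "owner".toList then true
  else if PySem.Chars.isIn ['('] d && PySem.Chars.isIn [')'] d then
    fuzzyACore ((PySem.Chars.splitOn d ['(']).headD []) ((PySem.Chars.splitOn c ['(']).headD [])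
  else false
termination_by d.length
decreasing_by
  rename_i h
  exact pvSplitHeadLt ((Bool.and_eq_true _ _).mp h).1

def fuzzyMatchExpr (doc_expr : String) (code_expr : String) : Bool :=
  fuzzyACore doc_expr.toList code_expr.toList

-- ===== PORT B =====
-- Source B's three merged per-pair checks; d.partition('_')[0] is the prefix of d before
-- the first '_' — exact as takeWhile (· != '_') for the one-char separator
def altChecks (d c : List Char) : Bool :=
  PySem.Chars.lower d == PySem.Chars.lower c ||
  (PySem.Chars.endswith d "_balance".toList &&
     (c == d.takeWhile (· != '_') ++ "Balance".toList)) ||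
  (d == "the caller".toList && c == "owner".toList)

-- Source B's loop over the candidate-pair list [(d,c)] (++ the pre-'(' prefixes if present),
-- returning at the first pair that passes the checks
def altCore (d c : List Char) : Bool :=
  if altChecks d c then true
  else if PySem.Chars.isIn ['('] d && PySem.Chars.isIn [')'] d then
    altChecks ((PySem.Chars.splitOn d ['(']).headD []) ((PySem.Chars.splitOn c ['(']).headD [])
  else false

def fuzzyMatchExpr_alt (doc_expr : String) (code_expr : String) : Bool :=
  altCore doc_expr.toList code_expr.toList

-- ===== PRECONDITION & SPEC =====
def Spec_fuzzyMatchExpr (doc_expr : String) (code_expr : String) (out : Bool) : Prop := out = fuzzyMatchExpr_alt doc_expr code_expr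
instance (doc_expr : String) (code_expr : String) (out : Bool) : Decidable (Spec_fuzzyMatchExpr doc_expr code_expr out) := by unfold Spec_fuzzyMatchExpr; infer_instance

-- ===== CLAIM =====
def Claim_equal_fuzzyMatchExpr : Prop := ∀ (doc_expr : String) (code_expr : String), Dom_fuzzyMatchExpr doc_expr code_expr → Spec_fuzzyMatchExpr doc_expr code_expr (fuzzyMatchExpr doc_expr code_expr)

-- ===== LEMMAS AND PROOFS =====
-- go always yields at least one piece
theorem pvGoNe (sep : Char) : ∀ (fuel : Nat) (l cur : List Char) (acc : List (List Char)),
    PySem.Chars.splitOn.go [sep] fuel l cur acc ≠ [] := by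
  intro fuel
  induction fuel with
  | zero => intro l cur acc; simp [PySem.Chars.splitOn.go]
  | succ n ih =>
    intro l cur acc
    cases l with
    | nil => simp [PySem.Chars.splitOn.go]
    | cons c rest =>
      rw [PySem.Chars.splitOn.go]
      by_cases h : List.isPrefixOf [sep] (c :: rest) = true
      · rw [if_pos h]; exact ih _ _ _
      · rw [if_neg h]; exact ih _ _ _

-- takeWhile (· != sep) ignores everything after an occurrence of sep
theorem pvTakeWhileAppend (sep : Char) (l m : List Char) (h : sep ∈ l) :
    (l ++ m).takeWhile (· != sep) = l.takeWhile (· != sep) := by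
  induction l with
  | nil => simp at h
  | cons c rest ih =>
    by_cases hc : c = sep
    · subst hc; simp [List.takeWhile]
    · have hcb : (c != sep) = true := by simp [bne, hc]
      have hm : sep ∈ rest := by
        cases h with
        | head => exact absurd rfl (fun hh => hc hh.symm)
        | tail _ hh => exact hh
      simp only [List.cons_append, List.takeWhile, hcb, ih hm]

-- getLastD of an append with nonempty right part, and default-irrelevance
theorem pvGetLastDDefault {α : Type} (l : List α) (h : l ≠ []) (x y : α) :
    l.getLastD x = l.getLastD y := by
  cases l with
  | nil => exact absurd rfl h
  | cons a t => rw [List.getLastD_cons, List.getLastD_cons]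

theorem pvGetLastDAppend {α : Type} (p l : List α) (h : l ≠ []) :
    ∀ x, (p ++ l).getLastD x = l.getLastD x := by
  induction p with
  | nil => intro x; rfl
  | cons a p ih =>
    intro x
    rw [List.cons_append, List.getLastD_cons, ih a, pvGetLastDDefault l h a x]

-- takeWhile runs through a prefix on which p holds everywhere
theorem pvTakeWhileAll {α : Type} (p : α → Bool) (l m : List α) (h : ∀ x ∈ l, p x = true) :
    (l ++ m).takeWhile p = l ++ m.takeWhile p := by
  induction l with
  | nil => simp
  | cons a t ih =>
    have ha : p a = true := h a (List.mem_cons_self ..)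
    simp only [List.cons_append, List.takeWhile, ha]
    rw [ih (fun x hx => h x (List.mem_cons_of_mem _ hx))]

-- the last piece of split(sep): the suffix after the last sep (or cur.reverse ++ l if none)
theorem pvLastGo (sep : Char) : ∀ (fuel : Nat) (l cur : List Char), l.length ≤ fuel →
    (PySem.Chars.splitOn.go [sep] fuel l cur []).getLastD [] =
      if sep ∈ l then (l.reverse.takeWhile (· != sep)).reverse else cur.reverse ++ l := by
  intro fuel
  induction fuel with
  | zero =>
    intro l cur hl
    have : l = [] := List.eq_nil_of_length_eq_zero (Nat.le_zero.mp hl)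
    subst this; simp [PySem.Chars.splitOn.go]
  | succ n ih =>
    intro l cur hl
    cases l with
    | nil => simp [PySem.Chars.splitOn.go]
    | cons c rest =>
      have hrl : rest.length ≤ n := Nat.lt_succ_iff.mp (by simpa using hl)
      rw [PySem.Chars.splitOn.go]
      by_cases h : List.isPrefixOf [sep] (c :: rest) = true
      · have hac : sep = c := by simp [List.isPrefixOf] at h; exact h
        subst hac
        rw [if_pos h, pvGoAcc, if_pos (List.mem_cons_self ..)]
        simp only [List.length_cons, List.length_nil, List.drop_succ_cons, List.drop_zero]
        rw [pvGetLastDAppend _ _ (pvGoNe sep n rest [] []) _, ih rest [] hrl]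
        by_cases hm : sep ∈ rest
        · rw [if_pos hm]
          have : (rest.reverse ++ [sep]).takeWhile (· != sep) = rest.reverse.takeWhile (· != sep) :=
            pvTakeWhileAppend sep rest.reverse [sep] (by simpa using hm)
          simp [this]
        · rw [if_neg hm]
          have hall : ∀ x ∈ rest.reverse, (x != sep) = true := by
            intro x hx; simp [bne]; intro hh; subst hh; exact hm (by simpa using hx)
          have : (rest.reverse ++ [sep]).takeWhile (· != sep) = rest.reverse := by
            rw [pvTakeWhileAll _ _ _ hall]
            simp [List.takeWhile, bne]
          simp [this]
      · have hac : ¬ sep = c := by intro hh; subst hh; simp [List.isPrefixOf] at h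
        rw [if_neg h, ih rest (c :: cur) hrl]
        by_cases hm : sep ∈ rest
        · rw [if_pos hm, if_pos (by exact List.mem_cons_of_mem _ hm)]
          have : (rest.reverse ++ [c]).takeWhile (· != sep) = rest.reverse.takeWhile (· != sep) :=
            pvTakeWhileAppend sep rest.reverse [c] (by simpa using hm)
          simp [this]
        · have hmc : ¬ sep ∈ c :: rest := by
            intro hh; cases hh with
            | head => exact hac rfl
            | tail _ hh => exact hm hh
          rw [if_neg hm, if_neg hmc]
          simp

theorem pvSplitOnLast (sep : Char) (s : List Char) (h : sep ∈ s) :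
    (PySem.Chars.splitOn s [sep]).getLastD [] = (s.reverse.takeWhile (· != sep)).reverse := by
  rw [PySem.Chars.splitOn, pvLastGo sep _ s [] (by omega), if_pos h]

-- when d ends with '_balance', its last '_'-piece is 'balance' (so its .title() is 'Balance')
set_option maxRecDepth 8000 in
theorem pvBalanceLast (d : List Char) (h : PySem.Chars.endswith d "_balance".toList = true) :
    (PySem.Chars.splitOn d ['_']).getLastD [] = "balance".toList := by
  obtain ⟨a, ha⟩ : ∃ a, d = a ++ '_' :: "balance".toList := by
    obtain ⟨a, ha⟩ := (PySem.Chars.endswith_iff d _).mp h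
    exact ⟨a, ha.symm⟩
  subst ha
  have hmem : '_' ∈ a ++ '_' :: "balance".toList :=
    List.mem_append_right _ (List.mem_cons_self ..)
  rw [pvSplitOnLast _ _ hmem]
  rw [List.reverse_append, List.reverse_cons, List.append_assoc, List.singleton_append]
  rw [pvTakeWhileAll _ _ _ (List.all_eq_true.mp rfl : ∀ x ∈ "balance".toList.reverse, (x != '_') = true)]
  simp [List.takeWhile, bne]

theorem pvIfOr (b x : Bool) : (if b = true then true else x) = (b || x) := by
  cases b <;> simp

set_option maxRecDepth 8000 in
-- A's chain of four if-return-True checks with tail X equals B's 3-way predicate or-ed with X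
theorem pvChainEq (d c : List Char) (X : Bool) :
    (if d == c then true
     else if PySem.Chars.lower d == PySem.Chars.lower c then true
     else if PySem.Chars.endswith d "_balance".toList &&
             ((PySem.Chars.splitOn d ['_']).headD [] ++
                pyTitle ((PySem.Chars.splitOn d ['_']).getLastD []) == c) then true
     else if d == "the caller".toList && c == "owner".toList then true
     else X) = (altChecks d c || X) := by
  rw [altChecks]
  by_cases h1 : (d == c) = true
  · have h2 : (PySem.Chars.lower d == PySem.Chars.lower c) = true := by
      rw [show d = c from by simpa using h1]; simp
    simp [h1, h2]
  rw [if_neg h1]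
  by_cases h2 : (PySem.Chars.lower d == PySem.Chars.lower c) = true
  · simp [h2]
  have h2f : (PySem.Chars.lower d == PySem.Chars.lower c) = false := by simpa using h2
  rw [if_neg h2, h2f, Bool.false_or]
  by_cases hbal : PySem.Chars.endswith d "_balance".toList = true
  · rw [pvBalanceLast d hbal, pvSplitOnHead,
        (show pyTitle "balance".toList = "Balance".toList from by decide),
        hbal, Bool.true_and, Bool.true_and, pvIfOr, pvIfOr]
    have hcomm : ((d.takeWhile (· != '_') ++ "Balance".toList) == c)
        = (c == (d.takeWhile (· != '_') ++ "Balance".toList)) := by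
      simp [eq_comm]
    rw [hcomm, Bool.or_assoc]
  · have hbf : PySem.Chars.endswith d "_balance".toList = false := by simpa using hbal
    rw [hbf, Bool.false_and, Bool.false_and, if_neg (by simp), Bool.false_or, pvIfOr]

-- the prefix before the first '(' contains no '('
theorem pvNoParen (s : List Char) :
    PySem.Chars.isIn ['('] ((PySem.Chars.splitOn s ['(']).headD []) = false := by
  rw [pvSplitOnHead, PySem.Chars.isIn_eq_false_iff]
  intro hinf
  have hm : '(' ∈ s.takeWhile (· != '(') := hinf.mem (by simp)
  have := List.mem_takeWhile_imp hm
  simp at this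

-- on a string without '(' A never recurses and computes exactly the merged checks
theorem pvNoParenEval (d c : List Char) (h : PySem.Chars.isIn ['('] d = false) :
    fuzzyACore d c = altChecks d c := by
  rw [fuzzyACore, pvChainEq]
  simp [h]

theorem pvCoreEq (d c : List Char) : fuzzyACore d c = altCore d c := by
  rw [fuzzyACore, pvChainEq, altCore]
  cases hac : altChecks d c with
  | true => simp
  | false =>
    simp only [Bool.false_or]
    by_cases hp : (PySem.Chars.isIn ['('] d && PySem.Chars.isIn [')'] d) = true
    · rw [if_pos hp]
      simp only [Bool.false_eq_true, if_false]
      rw [if_pos hp]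
      exact pvNoParenEval _ _ (pvNoParen d)
    · simp [hp]

-- ===== VERDICT =====
theorem fuzzyMatchExpr_spec : Claim_equal_fuzzyMatchExpr := by
  intro doc_expr code_expr _
  unfold Spec_fuzzyMatchExpr fuzzyMatchExpr fuzzyMatchExpr_alt
  exact pvCoreEq _ _
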